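-- pv_equiv track=rewrite | github.com/LambdaDrive/IntroductionToComputingUsingPython2ndEditionExercisesAndProblems | Chapter 5/Problem5_43.py | evenrow
-- ===== SOURCE A (Python) =====
-- def evenrow(matrix):
--     even = False
--     soma = 0
--     for row in matrix:
--         for number in row:
--             soma += number
--         if soma % 2 == 0:
--             even = True
--         else:
--             even = False
--         soma = 0
--     return even
-- ===== SOURCE B (Python) =====
-- def evenrow(matrix):
--     last = None
--     seen = False
--     for row in matrix:
--         last = row
--         seen = True
--     if not seen:
--         return False
--     return sum(last) % 2 == 0
-- ===== Notes on version B (the rewrite author's own statement) =====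
-- stated objective: simpler
-- what changed: B tracks only the last row while iterating and sums just that row once at the end, instead of A's summing every row and discarding all but the final parity.
import Mathlib
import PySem

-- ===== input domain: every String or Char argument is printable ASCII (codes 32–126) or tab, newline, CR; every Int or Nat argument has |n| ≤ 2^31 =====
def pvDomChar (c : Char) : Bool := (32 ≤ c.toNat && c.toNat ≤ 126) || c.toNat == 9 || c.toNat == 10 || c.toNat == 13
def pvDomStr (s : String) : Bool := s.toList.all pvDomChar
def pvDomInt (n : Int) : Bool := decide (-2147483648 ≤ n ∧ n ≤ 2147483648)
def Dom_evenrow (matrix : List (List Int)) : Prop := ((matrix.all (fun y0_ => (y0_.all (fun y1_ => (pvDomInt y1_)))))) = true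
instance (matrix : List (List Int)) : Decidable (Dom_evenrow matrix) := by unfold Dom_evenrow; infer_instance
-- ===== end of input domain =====

-- B tracks only the last row while iterating and sums just that row; A sums every row and keeps only the final parity (simpler).


-- ===== PORT A =====
def evenrow (matrix : List (List Int)) : Bool :=
  (matrix.foldl
    (fun (st : Bool × Int) row =>
      let soma := row.foldl (fun s n => s + n) st.2
      (if PySem.Int.mod soma 2 = 0 then true else false, 0))
    (false, 0)).1

-- ===== PORT B =====
def evenrow_alt (matrix : List (List Int)) : Bool :=
  let st := matrix.foldl
    (fun (_ : Option (List Int) × Bool) row => (some row, true))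
    (none, false)
  if st.2 = false then false
  else
    match st.1 with
    | none => false
    | some last => decide (PySem.Int.mod (last.foldl (fun s n => s + n) 0) 2 = 0)

-- ===== PRECONDITION & SPEC =====
def Spec_evenrow (matrix : List (List Int)) (out : Bool) : Prop := out = evenrow_alt matrix
instance (matrix : List (List Int)) (out : Bool) : Decidable (Spec_evenrow matrix out) := by unfold Spec_evenrow; infer_instance

-- ===== CLAIM (what is proved, stated in full; the proofs are below) =====
def Claim_equal_evenrow : Prop := ∀ (matrix : List (List Int)), Dom_evenrow matrix → Spec_evenrow matrix (evenrow matrix)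

-- ===== LEMMAS AND PROOFS =====
def pvCheck (r : List Int) : Bool := decide (PySem.Int.mod (r.foldl (fun s n => s + n) 0) 2 = 0)

theorem evenrow_foldl_eq (l : List (List Int)) (b : Bool) :
    (l.foldl
      (fun (st : Bool × Int) row =>
        let soma := row.foldl (fun s n => s + n) st.2
        (if PySem.Int.mod soma 2 = 0 then true else false, 0))
      (b, 0)) = (match l.getLast? with | none => b | some r => pvCheck r, 0) := by
  induction l generalizing b with
  | nil => simp
  | cons r rs ih =>
    have hstep :
        (List.foldl
          (fun (st : Bool × Int) row =>
            let soma := row.foldl (fun s n => s + n) st.2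
            (if PySem.Int.mod soma 2 = 0 then true else false, 0))
          (b, 0) (r :: rs))
        = (List.foldl
          (fun (st : Bool × Int) row =>
            let soma := row.foldl (fun s n => s + n) st.2
            (if PySem.Int.mod soma 2 = 0 then true else false, 0))
          (pvCheck r, 0) rs) := by
      simp [pvCheck]
    rw [hstep, ih]
    cases rs with
    | nil => simp
    | cons r' rs' =>
      rw [List.getLast?_cons_cons]
      cases h : (r' :: rs').getLast? with
      | none => simp at h
      | some x => simp

theorem evenrow_alt_foldl_eq (l : List (List Int)) (s : Option (List Int) × Bool) :
    (l.foldl (fun (_ : Option (List Int) × Bool) row => (some row, true)) s)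
    = (match l.getLast? with | none => s | some r => (some r, true)) := by
  induction l generalizing s with
  | nil => simp
  | cons r rs ih =>
    simp only [List.foldl_cons]
    rw [ih]
    cases rs with
    | nil => simp
    | cons r' rs' =>
      rw [List.getLast?_cons_cons]
      cases h : (r' :: rs').getLast? with
      | none => simp at h
      | some x => simp

-- ===== VERDICT (by name: the statement is the Claim_ definition above) =====
theorem evenrow_spec : Claim_equal_evenrow := by
  intro matrix _
  unfold Spec_evenrow evenrow evenrow_alt
  rw [evenrow_foldl_eq, evenrow_alt_foldl_eq]
  cases matrix.getLast? with
  | none => simp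
  | some r => simp [pvCheck]
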